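-- pv_equiv track=rewrite | github.com/lymchgmk/Algorithm-Problem-Solving | Progammers/코딩테스트/2019 카카오 개발자 겨울 인턴십/호텔 방 배정.py | solution
-- ===== SOURCE A (Python) =====
-- def solution(k, room_number):
--     def findEmptyRoom(number, rooms):
--         if number not in rooms:
--             rooms[number] = number + 1
--             return number
--         else:
--             empty = findEmptyRoom(rooms[number], rooms)
--             rooms[number] = empty + 1
--             return empty
--
--     answer = []
--     rooms = dict()
--     for number in room_number:
--         emptyRoom = findEmptyRoom(number, rooms)
--         answer.append(emptyRoom)
--
--     return answer
-- ===== SOURCE B (Python) =====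
-- def solution(k, room_number):
--     rooms = {}
--
--     def assign(number):
--         # iterative chain walk with path halving instead of recursive full compression
--         cur = number
--         while cur in rooms:
--             nxt = rooms[cur]
--             if nxt in rooms:
--                 rooms[cur] = rooms[nxt]  # path halving: skip one hop
--             cur = nxt
--         rooms[number] = cur + 1
--         rooms[cur] = cur + 1
--         return cur
--
--     return [assign(number) for number in room_number]
-- ===== Notes on version B (the rewrite author's own statement) =====
-- stated objective: alternative
-- what changed: A's recursive chain-walk with full path compression on the unwind is replaced by an iterative while-loop walk that applies path halving during the descent (the dict contents evolve differently but the assigned rooms are identical), and the outer loop becomes a list comprehension over a stateful helper.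
import Mathlib
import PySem

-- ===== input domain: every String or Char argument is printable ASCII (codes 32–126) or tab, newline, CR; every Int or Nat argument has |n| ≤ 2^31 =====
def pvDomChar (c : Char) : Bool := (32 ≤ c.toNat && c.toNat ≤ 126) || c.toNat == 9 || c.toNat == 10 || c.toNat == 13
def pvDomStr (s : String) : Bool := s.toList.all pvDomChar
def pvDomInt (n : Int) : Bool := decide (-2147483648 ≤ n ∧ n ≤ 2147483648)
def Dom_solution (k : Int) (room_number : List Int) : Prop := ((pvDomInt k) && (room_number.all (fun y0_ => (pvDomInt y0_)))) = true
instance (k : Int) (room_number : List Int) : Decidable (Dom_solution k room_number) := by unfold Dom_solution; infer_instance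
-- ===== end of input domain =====

-- B replaces A's recursive find (full path compression on the unwind) by an iterative walk
-- with path halving during the descent, and builds the answer by a comprehension-style
-- structural recursion instead of a foldl with appends (objective: alternative).
-- Both ports carry a fuel counter (room_number.length + 1) only to make the chain walk
-- structurally total; the proofs show it never runs out.

-- ===== PORT A =====
-- literal port of A's recursive findEmptyRoom (compression while unwinding)
def findEmptyRoom : Nat → Int → PySem.Dict Int Int → Option (Int × PySem.Dict Int Int)
  | 0, _, _ => none
  | fuel+1, number, rooms =>
    match rooms.get? number with
    | none => some (number, rooms.insert number (number + 1))
    | some v =>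
      match findEmptyRoom fuel v rooms with
      | none => none
      | some (empty, r) => some (empty, r.insert number (empty + 1))

def solution (k : Int) (room_number : List Int) : List Int :=
  (room_number.foldl
    (fun (st : List Int × PySem.Dict Int Int) number =>
      match findEmptyRoom (room_number.length + 1) number st.2 with
      | none => st
      | some (emptyRoom, rooms) => (st.1 ++ [emptyRoom], rooms))
    ([], PySem.Dict.empty)).1

-- ===== PORT B =====
-- literal port of B's while loop: tail-recursive walk, halving one hop as it descends
def halveWalk : Nat → Int → PySem.Dict Int Int → Option (Int × PySem.Dict Int Int)
  | 0, _, _ => none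
  | fuel+1, cur, rooms =>
    match rooms.get? cur with
    | none => some (cur, rooms)
    | some nxt =>
      let rooms' :=
        match rooms.get? nxt with
        | some g => rooms.insert cur g   -- path halving: skip one hop
        | none => rooms
      halveWalk fuel nxt rooms'

-- port of B's list comprehension over the stateful helper `assign`
def assignAll (fuel : Nat) (rooms : PySem.Dict Int Int) : List Int → List Int
  | [] => []
  | number :: rest =>
    match halveWalk fuel number rooms with
    | none => []
    | some (cur, r) =>
      cur :: assignAll fuel ((r.insert number (cur + 1)).insert cur (cur + 1)) rest

def solution_alt (k : Int) (room_number : List Int) : List Int :=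
  assignAll (room_number.length + 1) PySem.Dict.empty room_number

-- ===== PRECONDITION & SPEC =====
def Spec_solution (k : Int) (room_number : List Int) (out : List Int) : Prop := out = solution_alt k room_number
instance (k : Int) (room_number : List Int) (out : List Int) : Decidable (Spec_solution k room_number out) := by unfold Spec_solution; infer_instance

-- ===== CLAIM =====
def Claim_equal_solution : Prop := ∀ (k : Int) (room_number : List Int), Dom_solution k room_number → Spec_solution k room_number (solution k room_number)

-- ===== LEMMAS AND PROOFS =====

-- ghost model: occ is the set of occupied rooms; both dicts are "pointer structures" over occ
-- Inv d occ: keys of d are exactly occ, and every pointer jumps forward over occupied rooms only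
def RInv (d : PySem.Dict Int Int) (occ : Finset Int) : Prop :=
  (∀ x : Int, d.contains x = true ↔ x ∈ occ) ∧
  (∀ x v : Int, d.get? x = some v → x < v ∧ ∀ y : Int, x < y → y < v → y ∈ occ)

-- e is the first free room ≥ n
def FirstFree (n : Int) (occ : Finset Int) (e : Int) : Prop :=
  n ≤ e ∧ e ∉ occ ∧ ∀ y : Int, n ≤ y → y < e → y ∈ occ

theorem firstFree_unique {n : Int} {occ : Finset Int} {e e' : Int}
    (h : FirstFree n occ e) (h' : FirstFree n occ e') : e = e' := by
  obtain ⟨hn, hne, hall⟩ := h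
  obtain ⟨hn', hne', hall'⟩ := h'
  rcases lt_trichotomy e e' with hlt | heq | hgt
  · exact absurd (hall' e hn hlt) hne
  · exact heq
  · exact absurd (hall e' hn' hgt) hne'

-- fuel measure: number of occupied rooms ≥ n
def cnt (n : Int) (occ : Finset Int) : Nat := (occ.filter (fun x => n ≤ x)).card

theorem cnt_le_card (n : Int) (occ : Finset Int) : cnt n occ ≤ occ.card :=
  Finset.card_filter_le _ _

theorem cnt_lt {n v : Int} {occ : Finset Int} (hn : n ∈ occ) (hnv : n < v) :
    cnt v occ < cnt n occ := by
  apply Finset.card_lt_card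
  rw [Finset.ssubset_iff_of_subset]
  · exact ⟨n, Finset.mem_filter.2 ⟨hn, by simp⟩, by simp [Finset.mem_filter]; omega⟩
  · intro x hx
    simp only [Finset.mem_filter] at hx ⊢
    exact ⟨hx.1, by omega⟩

theorem mem_of_get?_some {d : PySem.Dict Int Int} {occ : Finset Int} {x v : Int}
    (hI : RInv d occ) (h : d.get? x = some v) : x ∈ occ := by
  rw [← hI.1, PySem.Dict.contains_eq_isSome_get?, h]; rfl

theorem not_mem_of_get?_none {d : PySem.Dict Int Int} {occ : Finset Int} {x : Int}
    (hI : RInv d occ) (h : d.get? x = none) : x ∉ occ := by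
  rw [← hI.1, PySem.Dict.contains_eq_isSome_get?, h]; simp

-- A's recursive find returns the first free room and keeps the invariant (vs. occ ∪ {e})
theorem findEmptyRoom_spec : ∀ (fuel : Nat) (n : Int) (d : PySem.Dict Int Int)
    (occ : Finset Int), RInv d occ → cnt n occ < fuel →
    ∃ e d', findEmptyRoom fuel n d = some (e, d') ∧ FirstFree n occ e ∧
      RInv d' (insert e occ) := by
  intro fuel
  induction fuel with
  | zero => intro n d occ _ h; omega
  | succ fuel ih =>
    intro n d occ hI hfuel
    cases hget : d.get? n with
    | none =>
      refine ⟨n, d.insert n (n + 1), by simp [findEmptyRoom, hget], ?_, ?_, ?_⟩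
      · exact ⟨le_refl n, not_mem_of_get?_none hI hget, fun y h1 h2 => by omega⟩
      · intro x
        rw [PySem.Dict.contains_insert, Finset.mem_insert, ← hI.1]
        by_cases hx : x = n <;> simp [hx]
      · intro x v hv
        rw [PySem.Dict.get?_insert] at hv
        by_cases hx : x = n
        · simp only [if_pos hx] at hv
          obtain ⟨rfl⟩ := hv
          exact ⟨by omega, fun y h1 h2 => by omega⟩
        · simp only [if_neg hx] at hv
          obtain ⟨hlt, hall⟩ := hI.2 x v hv
          exact ⟨hlt, fun y h1 h2 => Finset.mem_insert_of_mem (hall y h1 h2)⟩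
    | some v =>
      have hmem : n ∈ occ := mem_of_get?_some hI hget
      obtain ⟨hnv, hseg⟩ := hI.2 n v hget
      obtain ⟨e, d', heq, hFF, hI'⟩ :=
        ih v d occ hI (by have := cnt_lt hmem hnv; omega)
      obtain ⟨hve, hne, hall⟩ := hFF
      have hseg' : ∀ y : Int, n ≤ y → y < e → y ∈ occ := by
        intro y h1 h2
        by_cases hy : y < v
        · rcases eq_or_lt_of_le h1 with rfl | h1'
          · exact hmem
          · exact hseg y h1' hy
        · exact hall y (by omega) h2
      refine ⟨e, d'.insert n (e + 1), by simp [findEmptyRoom, hget, heq], ⟨by omega, hne, hseg'⟩, ?_, ?_⟩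
      · intro x
        rw [PySem.Dict.contains_insert]
        by_cases hx : x = n
        · subst hx
          have hx' : x ∈ insert e occ := Finset.mem_insert_of_mem hmem
          simp [hx']
        · simp only [show (x == n) = false by simp [hx], Bool.false_or]
          exact hI'.1 x
      · intro x w hw
        rw [PySem.Dict.get?_insert] at hw
        by_cases hx : x = n
        · simp only [if_pos hx] at hw
          obtain ⟨rfl⟩ := hw
          subst hx
          refine ⟨by omega, fun y h1 h2 => ?_⟩
          rcases lt_trichotomy y e with hz | rfl | hz
          · exact Finset.mem_insert_of_mem (hseg' y (le_of_lt h1) hz)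
          · exact Finset.mem_insert_self _ _
          · omega
        · simp only [if_neg hx] at hw
          exact hI'.2 x w hw

-- B's halving walk returns the first free room; its dict rewiring keeps the SAME occ
theorem halveWalk_spec : ∀ (fuel : Nat) (n : Int) (d : PySem.Dict Int Int)
    (occ : Finset Int), RInv d occ → cnt n occ < fuel →
    ∃ e d', halveWalk fuel n d = some (e, d') ∧ FirstFree n occ e ∧ RInv d' occ := by
  intro fuel
  induction fuel with
  | zero => intro n d occ _ h; omega
  | succ fuel ih =>
    intro n d occ hI hfuel
    cases hget : d.get? n with
    | none =>
      exact ⟨n, d, by simp [halveWalk, hget],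
        ⟨le_refl n, not_mem_of_get?_none hI hget, fun y h1 h2 => by omega⟩, hI⟩
    | some nxt =>
      have hmem : n ∈ occ := mem_of_get?_some hI hget
      obtain ⟨hlt, hseg⟩ := hI.2 n nxt hget
      -- the halved dict still satisfies the invariant wrt the same occ
      have hI1 : RInv (match d.get? nxt with
          | some g => d.insert n g
          | none => d) occ := by
        cases hg : d.get? nxt with
        | none => exact hI
        | some g =>
          obtain ⟨hg1, hg2⟩ := hI.2 nxt g hg
          constructor
          · intro x
            rw [PySem.Dict.contains_insert, ← hI.1]
            by_cases hx : x = n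
            · subst hx; simp [hI.1, hmem]
            · simp [show (x == n) = false by simp [hx]]
          · intro x w hw
            rw [PySem.Dict.get?_insert] at hw
            by_cases hx : x = n
            · simp only [if_pos hx] at hw
              obtain ⟨rfl⟩ := hw
              subst hx
              refine ⟨by omega, fun y h1 h2 => ?_⟩
              rcases lt_trichotomy y nxt with hy | rfl | hy
              · exact hseg y h1 hy
              · exact mem_of_get?_some hI hg
              · exact hg2 y hy h2
            · simp only [if_neg hx] at hw
              exact hI.2 x w hw
      obtain ⟨e, d', heq, hFF, hI'⟩ :=
        ih nxt _ occ hI1 (by have := cnt_lt hmem hlt; omega)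
      obtain ⟨hve, hne, hall⟩ := hFF
      refine ⟨e, d', ?_, ⟨by omega, hne, fun y h1 h2 => ?_⟩, hI'⟩
      · simpa [halveWalk, hget] using heq
      · by_cases hy : y < nxt
        · rcases eq_or_lt_of_le h1 with rfl | h1'
          · exact hmem
          · exact hseg y h1' hy
        · exact hall y (by omega) h2

-- after B assigns `number` and `e`, the invariant advances to occ ∪ {e}
theorem RInv_assign {d : PySem.Dict Int Int} {occ : Finset Int} {number e : Int}
    (hI : RInv d occ) (hFF : FirstFree number occ e) :
    RInv ((d.insert number (e + 1)).insert e (e + 1)) (insert e occ) := by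
  obtain ⟨hle, hne, hall⟩ := hFF
  have hnum : number ∈ insert e occ := by
    rcases eq_or_lt_of_le hle with rfl | hlt
    · exact Finset.mem_insert_self _ _
    · exact Finset.mem_insert_of_mem (hall number (le_refl _) hlt)
  constructor
  · intro x
    rw [PySem.Dict.contains_insert, PySem.Dict.contains_insert]
    by_cases hxe : x = e
    · subst hxe; simp
    · by_cases hxn : x = number
      · have hx' : x ∈ insert e occ := by rw [hxn]; exact hnum
        simp [show (x == number) = true by simp [hxn], hx']
      · simp [show (x == e) = false by simp [hxe],
              show (x == number) = false by simp [hxn],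
              Finset.mem_insert, hxe, hI.1]
  · intro x w hw
    rw [PySem.Dict.get?_insert, PySem.Dict.get?_insert] at hw
    by_cases hxe : x = e
    · simp only [if_pos hxe] at hw
      obtain ⟨rfl⟩ := hw
      subst hxe
      exact ⟨by omega, fun y h1 h2 => by omega⟩
    · simp only [if_neg hxe] at hw
      by_cases hxn : x = number
      · simp only [if_pos hxn] at hw
        obtain ⟨rfl⟩ := hw
        subst hxn
        refine ⟨by omega, fun y h1 h2 => ?_⟩
        rcases lt_trichotomy y e with hy | rfl | hy
        · exact Finset.mem_insert_of_mem (hall y (by omega) hy)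
        · exact Finset.mem_insert_self _ _
        · omega
      · simp only [if_neg hxn] at hw
        obtain ⟨h1, h2⟩ := hI.2 x w hw
        exact ⟨h1, fun y hy1 hy2 => Finset.mem_insert_of_mem (h2 y hy1 hy2)⟩

-- the two folds agree step by step: same first-free room each time
theorem fold_eq (F : Nat) : ∀ (l : List Int) (a : List Int)
    (dA dB : PySem.Dict Int Int) (occ : Finset Int),
    RInv dA occ → RInv dB occ → occ.card + l.length < F →
    (l.foldl
      (fun (st : List Int × PySem.Dict Int Int) number =>
        match findEmptyRoom F number st.2 with
        | none => st
        | some (emptyRoom, rooms) => (st.1 ++ [emptyRoom], rooms))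
      (a, dA)).1 = a ++ assignAll F dB l := by
  intro l
  induction l with
  | nil => intro a dA dB occ _ _ _; simp [assignAll]
  | cons number rest ih =>
    intro a dA dB occ hIA hIB hF
    have hcnt : cnt number occ < F := by
      have := cnt_le_card number occ; simp at hF; omega
    obtain ⟨e, dA', heqA, hFFA, hIA'⟩ := findEmptyRoom_spec F number dA occ hIA hcnt
    obtain ⟨e', dB', heqB, hFFB, hIB'⟩ := halveWalk_spec F number dB occ hIB hcnt
    obtain rfl : e = e' := firstFree_unique hFFA hFFB
    have hcard : (insert e occ).card + rest.length < F := by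
      have := Finset.card_insert_le e occ; simp at hF; omega
    simp only [List.foldl_cons, assignAll, heqA, heqB]
    rw [ih (a ++ [e]) dA' ((dB'.insert number (e + 1)).insert e (e + 1)) (insert e occ)
          hIA' (RInv_assign hIB' hFFB) hcard]
    simp

theorem RInv_empty : RInv PySem.Dict.empty (∅ : Finset Int) := by
  constructor
  · intro x; simp [PySem.Dict.contains_empty]
  · intro x v hv; simp [PySem.Dict.get?_empty] at hv

-- ===== VERDICT =====
theorem solution_spec : Claim_equal_solution := by
  intro k room_number _
  unfold Spec_solution solution solution_alt
  rw [fold_eq (room_number.length + 1) room_number [] PySem.Dict.empty PySem.Dict.empty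
        (∅ : Finset Int) RInv_empty RInv_empty (by simp)]
  simp
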